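-- pv_equiv track=rewrite | github.com/Sacabambaeus/Tm_Align_analysis | tree_map.py | detect_kingdom
-- ===== SOURCE A (Python) =====
-- from typing import Dict, Iterable, List, Optional, Tuple
--
-- KINGDOM_KEYWORDS = {
--     "a": {"animalia", "metazoa"},
--     "p": {"plantae", "viridiplantae", "streptophyta", "chloroplastida", "archaeplastida"},
--     "f": {"fungi"},
--     "r": {
--         "protista",
--         "protozoa",
--         "chromista",
--         "stramenopiles",
--         "alveolata",
--         "rhizaria",
--         "amoebozoa",
--         "haptophyta",
--         "cryptophyceae",
--     },
--     "m": {"monera", "bacteria", "eubacteria", "archaea"},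
-- }
--
-- def detect_kingdom(
--     taxid: Optional[int],
--     taxid_to_parent_rank: Dict[int, Tuple[int, str]],
--     taxid_to_name: Dict[int, str],
-- ) -> Optional[str]:
--     if taxid is None:
--         return None
--     names_in_lineage: List[str] = []
--     current = taxid
--     visited = set()
--     while current in taxid_to_parent_rank and current not in visited:
--         visited.add(current)
--         sci_name = taxid_to_name.get(current, "")
--         if sci_name:
--             names_in_lineage.append(sci_name.lower())
--         parent, _ = taxid_to_parent_rank[current]
--         if parent == current:
--             break
--         current = parent
--
--     for key, keywords in KINGDOM_KEYWORDS.items():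
--         if any(name in keywords for name in names_in_lineage):
--             return key
--     if any(name == "eukaryota" for name in names_in_lineage):
--         return "r"
--     return None
-- ===== SOURCE B (Python) =====
-- from typing import Dict, Optional, Tuple
--
-- # reverse index: keyword -> (kingdom key, precedence rank); eukaryota ranks last and maps to "r"
-- KEYWORD_TO_RANK = {
--     "animalia": ("a", 0), "metazoa": ("a", 0),
--     "plantae": ("p", 1), "viridiplantae": ("p", 1), "streptophyta": ("p", 1),
--     "chloroplastida": ("p", 1), "archaeplastida": ("p", 1),
--     "fungi": ("f", 2),
--     "protista": ("r", 3), "protozoa": ("r", 3), "chromista": ("r", 3),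
--     "stramenopiles": ("r", 3), "alveolata": ("r", 3), "rhizaria": ("r", 3),
--     "amoebozoa": ("r", 3), "haptophyta": ("r", 3), "cryptophyceae": ("r", 3),
--     "monera": ("m", 4), "bacteria": ("m", 4), "eubacteria": ("m", 4), "archaea": ("m", 4),
--     "eukaryota": ("r", 5),
-- }
--
-- def detect_kingdom(
--     taxid: Optional[int],
--     taxid_to_parent_rank: Dict[int, Tuple[int, str]],
--     taxid_to_name: Dict[int, str],
-- ) -> Optional[str]:
--     if taxid is None:
--         return None
--     best = None  # (key, rank) with the smallest rank seen so far
--     current = taxid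
--     visited = set()
--     while current in taxid_to_parent_rank and current not in visited:
--         visited.add(current)
--         name = taxid_to_name.get(current, "").lower()
--         hit = KEYWORD_TO_RANK.get(name)
--         if hit is not None and (best is None or hit[1] < best[1]):
--             best = hit
--         parent, _ = taxid_to_parent_rank[current]
--         if parent == current:
--             break
--         current = parent
--     return best[0] if best is not None else None
-- ===== Notes on version B (the rewrite author's own statement) =====
-- stated objective: idiomatic
-- what changed: A collects all lineage names and then runs five priority-ordered keyword-set scans plus a eukaryota fallback scan; B precomputes a reverse keyword->(kingdom,rank) map (eukaryota ranked last, mapping to 'r') and keeps the minimal-rank hit in a single pass during the lineage walk.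
import Mathlib
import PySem

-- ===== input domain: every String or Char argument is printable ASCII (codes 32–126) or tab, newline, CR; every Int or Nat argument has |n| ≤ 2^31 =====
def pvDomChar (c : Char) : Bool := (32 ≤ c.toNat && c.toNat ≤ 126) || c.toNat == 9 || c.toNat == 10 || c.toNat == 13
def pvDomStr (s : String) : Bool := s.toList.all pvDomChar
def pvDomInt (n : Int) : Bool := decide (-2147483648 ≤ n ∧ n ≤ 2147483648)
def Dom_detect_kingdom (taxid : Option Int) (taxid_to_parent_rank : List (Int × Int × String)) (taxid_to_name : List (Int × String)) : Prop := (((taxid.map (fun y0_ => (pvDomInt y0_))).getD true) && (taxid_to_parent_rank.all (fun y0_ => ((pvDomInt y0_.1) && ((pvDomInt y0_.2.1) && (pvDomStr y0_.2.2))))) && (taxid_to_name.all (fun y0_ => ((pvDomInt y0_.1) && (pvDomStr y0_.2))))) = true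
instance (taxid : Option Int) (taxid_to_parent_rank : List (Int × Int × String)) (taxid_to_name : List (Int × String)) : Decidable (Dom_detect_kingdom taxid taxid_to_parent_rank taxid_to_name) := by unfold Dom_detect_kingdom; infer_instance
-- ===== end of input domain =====

-- B replaces A's five priority-ordered keyword-set scans over the collected lineage names by a single
-- reverse keyword→(key,rank) index consulted during the walk, keeping the minimal-rank hit (idiomatic).

-- ===== PORT A =====
def KINGDOM_KEYWORDS : List (String × PySem.Set String) :=
  [("a", ["animalia", "metazoa"]),
   ("p", ["plantae", "viridiplantae", "streptophyta", "chloroplastida", "archaeplastida"]),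
   ("f", ["fungi"]),
   ("r", ["protista", "protozoa", "chromista", "stramenopiles", "alveolata", "rhizaria",
          "amoebozoa", "haptophyta", "cryptophyceae"]),
   ("m", ["monera", "bacteria", "eubacteria", "archaea"])]

-- the while loop of A: collect lowercased non-empty names along the lineage.
-- fuel = (length of the dict) + 1 strictly bounds the iterations: each iteration's `current`
-- is an unvisited key of the dict and is added to `visited`, so the loop runs ≤ #keys times.
def walkA (pr : PySem.Dict Int (Int × String)) (nm : PySem.Dict Int String) :
    Nat → Int → PySem.Set Int → List String
  | 0, _, _ => []
  | fuel + 1, current, visited =>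
    match pr.get? current with
    | none => []
    | some pv =>
      if PySem.Set.contains visited current then []
      else
        let visited' := PySem.Set.add visited current
        let sci := nm.getD current ""
        let names := if sci ≠ "" then [PySem.Str.lower sci] else []
        if pv.1 == current then names
        else names ++ walkA pr nm fuel pv.1 visited'

def detect_kingdom (taxid : Option Int) (taxid_to_parent_rank : List (Int × Int × String)) (taxid_to_name : List (Int × String)) : Option String :=
  match taxid with
  | none => none
  | some t =>
    let names := walkA (PySem.Dict.mk taxid_to_parent_rank) (PySem.Dict.mk taxid_to_name)
        (taxid_to_parent_rank.length + 1) t PySem.Set.empty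
    match KINGDOM_KEYWORDS.find? (fun kv => names.any (fun n => PySem.Set.contains kv.2 n)) with
    | some kv => some kv.1
    | none => if names.any (fun n => n == "eukaryota") then some "r" else none

-- ===== PORT B =====
def KEYWORD_TO_RANK : PySem.Dict String (String × Nat) := PySem.Dict.mk
  [("animalia", ("a", 0)), ("metazoa", ("a", 0)),
   ("plantae", ("p", 1)), ("viridiplantae", ("p", 1)), ("streptophyta", ("p", 1)),
   ("chloroplastida", ("p", 1)), ("archaeplastida", ("p", 1)),
   ("fungi", ("f", 2)),
   ("protista", ("r", 3)), ("protozoa", ("r", 3)), ("chromista", ("r", 3)),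
   ("stramenopiles", ("r", 3)), ("alveolata", ("r", 3)), ("rhizaria", ("r", 3)),
   ("amoebozoa", ("r", 3)), ("haptophyta", ("r", 3)), ("cryptophyceae", ("r", 3)),
   ("monera", ("m", 4)), ("bacteria", ("m", 4)), ("eubacteria", ("m", 4)), ("archaea", ("m", 4)),
   ("eukaryota", ("r", 5))]

-- the while loop of B: track the minimal-rank hit of the reverse index (same fuel bound as walkA).
def walkB (pr : PySem.Dict Int (Int × String)) (nm : PySem.Dict Int String) :
    Nat → Int → PySem.Set Int → Option (String × Nat) → Option (String × Nat)
  | 0, _, _, best => best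
  | fuel + 1, current, visited, best =>
    match pr.get? current with
    | none => best
    | some pv =>
      if PySem.Set.contains visited current then best
      else
        let visited' := PySem.Set.add visited current
        let name := PySem.Str.lower (nm.getD current "")
        let best' :=
          match KEYWORD_TO_RANK.get? name with
          | some hit =>
            match best with
            | none => some hit
            | some b => if hit.2 < b.2 then some hit else some b
          | none => best
        if pv.1 == current then best'
        else walkB pr nm fuel pv.1 visited' best'

def detect_kingdom_alt (taxid : Option Int) (taxid_to_parent_rank : List (Int × Int × String)) (taxid_to_name : List (Int × String)) : Option String :=
  match taxid with
  | none => none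
  | some t =>
    (walkB (PySem.Dict.mk taxid_to_parent_rank) (PySem.Dict.mk taxid_to_name)
        (taxid_to_parent_rank.length + 1) t PySem.Set.empty none).map (·.1)

-- ===== PRECONDITION & SPEC =====
def Spec_detect_kingdom (taxid : Option Int) (taxid_to_parent_rank : List (Int × Int × String)) (taxid_to_name : List (Int × String)) (out : Option String) : Prop := out = detect_kingdom_alt taxid taxid_to_parent_rank taxid_to_name
instance (taxid : Option Int) (taxid_to_parent_rank : List (Int × Int × String)) (taxid_to_name : List (Int × String)) (out : Option String) : Decidable (Spec_detect_kingdom taxid taxid_to_parent_rank taxid_to_name out) := by unfold Spec_detect_kingdom; infer_instance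

-- ===== CLAIM (what is proved, stated in full; the proofs are below) =====
def Claim_equal_detect_kingdom : Prop := ∀ (taxid : Option Int) (taxid_to_parent_rank : List (Int × Int × String)) (taxid_to_name : List (Int × String)), Dom_detect_kingdom taxid taxid_to_parent_rank taxid_to_name → Spec_detect_kingdom taxid taxid_to_parent_rank taxid_to_name (detect_kingdom taxid taxid_to_parent_rank taxid_to_name)

-- ===== LEMMAS AND PROOFS =====

def keyOf (i : Nat) : String :=
  if i = 0 then "a" else if i = 1 then "p" else if i = 2 then "f"
  else if i = 3 then "r" else if i = 4 then "m" else "r"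
def rk (n : String) : Option Nat := (KEYWORD_TO_RANK.get? n).map (·.2)
def KEYS : List String :=
  ["animalia", "metazoa", "plantae", "viridiplantae", "streptophyta", "chloroplastida",
   "archaeplastida", "fungi", "protista", "protozoa", "chromista", "stramenopiles",
   "alveolata", "rhizaria", "amoebozoa", "haptophyta", "cryptophyceae",
   "monera", "bacteria", "eubacteria", "archaea", "eukaryota"]
lemma get?_none (n : String) (h : n ∉ KEYS) : KEYWORD_TO_RANK.get? n = none := by
  rw [PySem.Dict.get?_eq_none_iff_not_mem_keys]
  simpa [KEYWORD_TO_RANK, KEYS] using h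
lemma key_eq_aux (n : String) :
    ((KEYWORD_TO_RANK.get? n).map (fun hit => hit.1 == keyOf hit.2)).getD true = true := by
  by_cases hm : n ∈ KEYS
  · simp only [KEYS, List.mem_cons, List.not_mem_nil, or_false] at hm
    rcases hm with h'|h'|h'|h'|h'|h'|h'|h'|h'|h'|h'|h'|h'|h'|h'|h'|h'|h'|h'|h'|h'|h' <;>
      subst h' <;> decide
  · rw [get?_none n hm]; rfl
lemma get?_key_eq (n : String) (hit : String × Nat) (h : KEYWORD_TO_RANK.get? n = some hit) :
    hit.1 = keyOf hit.2 := by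
  have := key_eq_aux n
  rw [h] at this; simpa using this
lemma rk_le_aux (n : String) : (rk n).getD 0 ≤ 5 := by
  by_cases hm : n ∈ KEYS
  · simp only [KEYS, List.mem_cons, List.not_mem_nil, or_false] at hm
    rcases hm with h'|h'|h'|h'|h'|h'|h'|h'|h'|h'|h'|h'|h'|h'|h'|h'|h'|h'|h'|h'|h'|h' <;>
      subst h' <;> decide
  · simp [rk, get?_none n hm]
lemma rk_le_five (n : String) (j : Nat) (h : rk n = some j) : j ≤ 5 := by
  have := rk_le_aux n
  rw [h] at this; simpa using this
lemma contains_eq_rk0 (n : String) :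
    PySem.Set.contains ["animalia", "metazoa"] n = (rk n == some 0) := by
  by_cases hm : n ∈ KEYS
  · simp only [KEYS, List.mem_cons, List.not_mem_nil, or_false] at hm
    rcases hm with h'|h'|h'|h'|h'|h'|h'|h'|h'|h'|h'|h'|h'|h'|h'|h'|h'|h'|h'|h'|h'|h' <;>
      subst h' <;> decide
  · have h0 := get?_none n hm
    simp only [KEYS, List.mem_cons, List.not_mem_nil, or_false, not_or] at hm
    simp [rk, h0, PySem.Set.contains, List.mem_cons]
    tauto
lemma contains_eq_rk1 (n : String) :
    PySem.Set.contains ["plantae", "viridiplantae", "streptophyta", "chloroplastida", "archaeplastida"] n = (rk n == some 1) := by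
  by_cases hm : n ∈ KEYS
  · simp only [KEYS, List.mem_cons, List.not_mem_nil, or_false] at hm
    rcases hm with h'|h'|h'|h'|h'|h'|h'|h'|h'|h'|h'|h'|h'|h'|h'|h'|h'|h'|h'|h'|h'|h' <;>
      subst h' <;> decide
  · have h0 := get?_none n hm
    simp only [KEYS, List.mem_cons, List.not_mem_nil, or_false, not_or] at hm
    simp [rk, h0, PySem.Set.contains, List.mem_cons]
    tauto
lemma contains_eq_rk2 (n : String) :
    PySem.Set.contains ["fungi"] n = (rk n == some 2) := by
  by_cases hm : n ∈ KEYS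
  · simp only [KEYS, List.mem_cons, List.not_mem_nil, or_false] at hm
    rcases hm with h'|h'|h'|h'|h'|h'|h'|h'|h'|h'|h'|h'|h'|h'|h'|h'|h'|h'|h'|h'|h'|h' <;>
      subst h' <;> decide
  · have h0 := get?_none n hm
    simp only [KEYS, List.mem_cons, List.not_mem_nil, or_false, not_or] at hm
    simp [rk, h0, PySem.Set.contains, List.mem_cons]
    tauto
lemma contains_eq_rk3 (n : String) :
    PySem.Set.contains ["protista", "protozoa", "chromista", "stramenopiles", "alveolata", "rhizaria", "amoebozoa", "haptophyta", "cryptophyceae"] n = (rk n == some 3) := by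
  by_cases hm : n ∈ KEYS
  · simp only [KEYS, List.mem_cons, List.not_mem_nil, or_false] at hm
    rcases hm with h'|h'|h'|h'|h'|h'|h'|h'|h'|h'|h'|h'|h'|h'|h'|h'|h'|h'|h'|h'|h'|h' <;>
      subst h' <;> decide
  · have h0 := get?_none n hm
    simp only [KEYS, List.mem_cons, List.not_mem_nil, or_false, not_or] at hm
    simp [rk, h0, PySem.Set.contains, List.mem_cons]
    tauto
lemma contains_eq_rk4 (n : String) :
    PySem.Set.contains ["monera", "bacteria", "eubacteria", "archaea"] n = (rk n == some 4) := by
  by_cases hm : n ∈ KEYS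
  · simp only [KEYS, List.mem_cons, List.not_mem_nil, or_false] at hm
    rcases hm with h'|h'|h'|h'|h'|h'|h'|h'|h'|h'|h'|h'|h'|h'|h'|h'|h'|h'|h'|h'|h'|h' <;>
      subst h' <;> decide
  · have h0 := get?_none n hm
    simp only [KEYS, List.mem_cons, List.not_mem_nil, or_false, not_or] at hm
    simp [rk, h0, PySem.Set.contains, List.mem_cons]
    tauto
lemma euk_iff_rk (n : String) : (n == "eukaryota") = (rk n == some 5) := by
  by_cases hm : n ∈ KEYS
  · simp only [KEYS, List.mem_cons, List.not_mem_nil, or_false] at hm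
    rcases hm with h'|h'|h'|h'|h'|h'|h'|h'|h'|h'|h'|h'|h'|h'|h'|h'|h'|h'|h'|h'|h'|h' <;>
      subst h' <;> decide
  · have h0 := get?_none n hm
    simp only [KEYS, List.mem_cons, List.not_mem_nil, or_false, not_or] at hm
    simp [rk, h0]
    exact fun h => absurd h hm.right.right.right.right.right.right.right.right.right.right.right.right.right.right.right.right.right.right.right.right.right
def omin : Option Nat → Option Nat → Option Nat
  | none, b => b
  | some a, none => some a
  | some a, some b => some (min a b)
def stepB (best : Option (String × Nat)) (n : String) : Option (String × Nat) :=
  match KEYWORD_TO_RANK.get? n with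
  | some hit =>
    match best with
    | none => some hit
    | some b => if hit.2 < b.2 then some hit else some b
  | none => best
lemma foldl_stepB (names : List String) :
    ∀ (m : Option Nat),
    names.foldl stepB (m.map (fun i => (keyOf i, i))) =
      (names.foldl (fun a n => omin a (rk n)) m).map (fun i => (keyOf i, i)) := by
  induction names with
  | nil => intro m; rfl
  | cons n t ih =>
    intro m
    have hstep : stepB (m.map (fun i => (keyOf i, i))) n =
        (omin m (rk n)).map (fun i => (keyOf i, i)) := by
      cases hg : KEYWORD_TO_RANK.get? n with
      | none =>
        cases m <;> simp [stepB, hg, rk, omin]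
      | some hit =>
        have hk := get?_key_eq n hit hg
        cases m with
        | none => simp [stepB, hg, rk, omin, ← hk]
        | some a =>
          simp only [stepB, hg, rk, omin, Option.map_some]
          by_cases hlt : hit.2 < a
          · simp [hlt, Nat.min_eq_right (le_of_lt hlt), ← hk]
          · simp [hlt, Nat.min_eq_left (Nat.le_of_not_lt hlt)]
    simp only [List.foldl_cons, hstep, ih]
def minr (names : List String) : Option Nat := names.foldl (fun a n => omin a (rk n)) none
lemma g_none (names : List String) :
    ∀ (m : Option Nat), names.foldl (fun a n => omin a (rk n)) m = none ↔
      (m = none ∧ ∀ n ∈ names, rk n = none) := by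
  induction names with
  | nil => intro m; simp
  | cons n t ih =>
    intro m
    rw [List.foldl_cons, ih]
    constructor
    · rintro ⟨h1, h2⟩
      cases m <;> cases hr : rk n <;> simp_all [omin]
    · rintro ⟨h1, h2⟩
      subst h1
      refine ⟨?_, fun x hx => h2 x (List.mem_cons_of_mem _ hx)⟩
      rw [h2 n (List.mem_cons_self)]
      rfl
lemma g_min (names : List String) :
    ∀ (m : Option Nat) (i : Nat), names.foldl (fun a n => omin a (rk n)) m = some i →
      ((∀ j, m = some j → i ≤ j) ∧ ∀ n ∈ names, ∀ j, rk n = some j → i ≤ j) := by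
  induction names with
  | nil => intro m i h; simp_all
  | cons n t ih =>
    intro m i h
    rw [List.foldl_cons] at h
    obtain ⟨ha, ht⟩ := ih _ _ h
    constructor
    · intro j hj
      subst hj
      cases hr : rk n with
      | none => exact ha j (by simp [omin, hr])
      | some r =>
        have := ha (min j r) (by simp [omin, hr])
        omega
    · intro x hx j hj
      rcases List.mem_cons.mp hx with h'|h'
      · subst h'
        rw [hj] at ha
        cases m with
        | none => exact ha j rfl
        | some a =>
          have := ha (min a j) rfl
          omega
      · exact ht x h' j hj
lemma g_mem (names : List String) :
    ∀ (m : Option Nat) (i : Nat), names.foldl (fun a n => omin a (rk n)) m = some i →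
      m = some i ∨ ∃ n ∈ names, rk n = some i := by
  induction names with
  | nil => intro m i h; simp_all
  | cons n t ih =>
    intro m i h
    rw [List.foldl_cons] at h
    rcases ih _ _ h with h'|⟨x, hx, hr⟩
    · cases m with
      | none =>
        right
        exact ⟨n, List.mem_cons_self, by simpa [omin] using h'⟩
      | some a =>
        cases hr : rk n with
        | none => left; simpa [omin, hr] using h'
        | some r =>
          simp only [omin, hr] at h'
          have hmin : min a r = i := by injection h'
          rcases min_cases a r with ⟨he, _⟩|⟨he, _⟩
          · left; rw [← hmin, he]
          · right; exact ⟨n, List.mem_cons_self, by rw [hr, ← hmin, he]⟩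
    · exact Or.inr ⟨x, List.mem_cons_of_mem _ hx, hr⟩
lemma minr_eq_some (names : List String) (k : Nat)
    (hk : names.any (fun n => rk n == some k) = true)
    (hlt : ∀ j < k, names.any (fun n => rk n == some j) = false) :
    minr names = some k := by
  obtain ⟨x, hx, hr⟩ := List.any_eq_true.mp hk
  have hrx : rk x = some k := by simpa using hr
  cases hmr : minr names with
  | none =>
    exfalso
    have := ((g_none names none).mp (by simpa [minr] using hmr)).2 x hx
    rw [this] at hrx; cases hrx
  | some i =>
    have hmg : names.foldl (fun a n => omin a (rk n)) none = some i := by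
      simpa [minr] using hmr
    have hile : i ≤ k := (g_min names none i hmg).2 x hx k hrx
    rcases g_mem names none i hmg with h'|⟨y, hy, hry⟩
    · cases h'
    · rcases Nat.lt_or_ge i k with hik|hik
      · have hfalse := hlt i hik
        rw [List.any_eq_false] at hfalse
        exact absurd (by simp [hry]) (hfalse y hy)
      · have hik' : i = k := le_antisymm hile hik
        rw [hik']
lemma minr_eq_none (names : List String)
    (h : ∀ j ≤ 5, names.any (fun n => rk n == some j) = false) :
    minr names = none := by
  rw [minr, g_none]
  refine ⟨rfl, fun n hn => ?_⟩
  cases hr : rk n with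
  | none => rfl
  | some j =>
    have hj := rk_le_five n j hr
    have := h j hj
    rw [List.any_eq_false] at this
    exact absurd (by simp [hr]) (this n hn)
lemma classify_eq (names : List String) :
    (match KINGDOM_KEYWORDS.find? (fun kv => names.any (fun n => PySem.Set.contains kv.2 n)) with
     | some kv => some kv.1
     | none => if names.any (fun n => n == "eukaryota") then some "r" else none) =
    (minr names).map keyOf := by
  simp only [KINGDOM_KEYWORDS, List.find?, contains_eq_rk0, contains_eq_rk1, contains_eq_rk2,
    contains_eq_rk3, contains_eq_rk4, euk_iff_rk]
  cases hb0 : names.any (fun n => rk n == some 0) with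
  | true =>
    rw [minr_eq_some names 0 hb0 (by omega)]
    rfl
  | false =>
  cases hb1 : names.any (fun n => rk n == some 1) with
  | true =>
    rw [minr_eq_some names 1 hb1 (by intro j hj; interval_cases j; assumption)]
    rfl
  | false =>
  cases hb2 : names.any (fun n => rk n == some 2) with
  | true =>
    rw [minr_eq_some names 2 hb2 (by intro j hj; interval_cases j <;> assumption)]
    rfl
  | false =>
  cases hb3 : names.any (fun n => rk n == some 3) with
  | true =>
    rw [minr_eq_some names 3 hb3 (by intro j hj; interval_cases j <;> assumption)]
    rfl
  | false =>
  cases hb4 : names.any (fun n => rk n == some 4) with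
  | true =>
    rw [minr_eq_some names 4 hb4 (by intro j hj; interval_cases j <;> assumption)]
    rfl
  | false =>
  cases hb5 : names.any (fun n => rk n == some 5) with
  | true =>
    rw [minr_eq_some names 5 hb5 (by intro j hj; interval_cases j <;> assumption)]
    rfl
  | false =>
    rw [minr_eq_none names (by intro j hj; interval_cases j <;> assumption)]
    rfl

lemma walk_rel (pr : PySem.Dict Int (Int × String)) (nm : PySem.Dict Int String) :
    ∀ (fuel : Nat) (cur : Int) (vis : PySem.Set Int) (best : Option (String × Nat)),
    walkB pr nm fuel cur vis best = (walkA pr nm fuel cur vis).foldl stepB best := by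
  intro fuel
  induction fuel with
  | zero => intro cur vis best; simp [walkA, walkB]
  | succ fuel ih =>
    intro cur vis best
    simp only [walkA, walkB]
    cases hpv : pr.get? cur with
    | none => simp
    | some pv =>
      by_cases hv : cur ∈ vis
      · simp [hv]
      · by_cases hs : nm.getD cur "" = ""
        · have hz : KEYWORD_TO_RANK.get? (PySem.Str.lower "") = none := by decide
          by_cases hp : pv.1 == cur <;>
            simp [hs, hp, hz, hv, ih]
        · have hstep : ∀ b, List.foldl stepB b [PySem.Str.lower (nm.getD cur "")]
              = stepB b (PySem.Str.lower (nm.getD cur "")) := by intro b; rfl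
          by_cases hp : pv.1 == cur
          · simp [hs, hp, hv, hstep, stepB]
          · simp [hs, hp, hv, ih, stepB]


-- ===== VERDICT (by name: the statement is the Claim_ definition above) =====
theorem detect_kingdom_spec : Claim_equal_detect_kingdom := by
  intro taxid pr nm _
  unfold Spec_detect_kingdom detect_kingdom detect_kingdom_alt
  cases taxid with
  | none => rfl
  | some t =>
    simp only [walk_rel]
    have h := foldl_stepB (walkA (PySem.Dict.mk pr) (PySem.Dict.mk nm) (pr.length + 1) t PySem.Set.empty) none
    simp only [Option.map_none] at h
    rw [h, classify_eq]
    simp [minr, Option.map_map]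
    rfl
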